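-- pv_equiv track=rewrite | github.com/kedar-naik/iterative_methods | HB_practice.py | parse_time_discretization_string
-- ===== SOURCE A (Python) =====
-- def parse_time_discretization_string(omegas, time_discretization):
--     '''
--     read in the time-discretization string and parse out the different pieces,
--     namely: the discretization style (i.e. whether we're using T1 or Nyquist),
--     the type of spacing (i.e. whether the spacing is uniform or arbitrary), and
--     the number of time instances.
--     '''
--     # compute N_0
--     K = len(omegas)     # number of angular frequencies provided
--     N_0 = 2*K+1         # minimum points required for trig interpolation
--     # initialize to defaults (use_Nyquist, uniform spacing (not random), N=N_0)
--     options = ['use_Nyquist', False, N_0]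
--     # parse the time_discretization string passed in
--     options_passed_in = time_discretization.split('-')
--     # run through the tokens and set the various options
--     for option in options_passed_in:
--         if option:
--             if option[:4]=='use_':
--                 options[0] = option
--             elif option=='random':
--                 options[1] = True
--             else:
--                 options[2] = int(option)
--     # rename the options for clarity
--     discretization_style = options[0]   # (use_T1, use_Nyquist)
--     nonuniform_spacing = options[1]     # (True, False)
--     N = options[2]                      # an integer
--     # return the options found
--     return discretization_style, nonuniform_spacing, N
-- ===== SOURCE B (Python) =====
-- def parse_time_discretization_string(omegas, time_discretization):
--     # three category-specific passes over the non-empty tokens, last-wins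
--     tokens = [t for t in time_discretization.split('-') if t]
--     styles = [t for t in tokens if t[:4] == 'use_']
--     discretization_style = styles[-1] if styles else 'use_Nyquist'
--     nonuniform_spacing = 'random' in tokens
--     numbers = [int(t) for t in tokens if t[:4] != 'use_' and t != 'random']
--     N = numbers[-1] if numbers else 2*len(omegas)+1
--     return discretization_style, nonuniform_spacing, N
-- ===== Notes on version B (the rewrite author's own statement) =====
-- stated objective: alternative
-- what changed: A's single interleaved classify-loop mutating an options triple is replaced by three independent category-specific passes over the split tokens (last 'use_' token, membership test for 'random', int() over the leftover tokens keeping the last).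
-- outside the precondition, e.g. on parse_time_discretization_string([1, 2], 'use_T1-abc-5'): A raises ValueError, B raises ValueError
import Mathlib
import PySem

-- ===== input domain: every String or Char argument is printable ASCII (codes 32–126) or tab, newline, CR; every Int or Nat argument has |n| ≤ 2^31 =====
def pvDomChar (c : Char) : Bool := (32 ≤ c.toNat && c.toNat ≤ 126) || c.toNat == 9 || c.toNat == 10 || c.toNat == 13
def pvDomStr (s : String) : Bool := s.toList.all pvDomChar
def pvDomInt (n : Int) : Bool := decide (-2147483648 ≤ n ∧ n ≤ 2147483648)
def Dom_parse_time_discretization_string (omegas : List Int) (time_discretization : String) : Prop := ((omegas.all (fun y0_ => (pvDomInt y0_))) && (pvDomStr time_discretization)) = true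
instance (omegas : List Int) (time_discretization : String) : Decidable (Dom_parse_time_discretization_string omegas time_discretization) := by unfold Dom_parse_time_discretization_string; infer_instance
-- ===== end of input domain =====

-- B replaces A's single interleaved classify-loop by three category-specific passes over the tokens (alternative decomposition, same cost).


-- ===== PORT A =====
-- one step of A's for-loop over the options list; the Option state is none once int(option) has raised
def pvStepA (st : Option (String × Bool × Int)) (option : String) : Option (String × Bool × Int) :=
  match st with
  | none => none
  | some (s, b, n) =>
    if option != "" then
      if PySem.Str.slice option none (some 4) == "use_" then some (option, b, n)
      else if option == "random" then some (s, true, n)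
      else match PySem.Int.ofStr? option with
           | some v => some (s, b, v)
           | none => none
    else some (s, b, n)

def parse_time_discretization_string (omegas : List Int) (time_discretization : String) : String × Bool × Int :=
  let K : Int := omegas.length
  let N_0 : Int := 2 * K + 1
  let options_passed_in := (PySem.Str.split? time_discretization "-").getD []
  match options_passed_in.foldl pvStepA (some ("use_Nyquist", false, N_0)) with
  | some (s, b, n) => (s, b, n)
  | none => ("use_Nyquist", false, N_0)   -- unreachable under Pre_ (Python A raises ValueError here)

-- ===== PORT B =====
def parse_time_discretization_string_alt (omegas : List Int) (time_discretization : String) : String × Bool × Int :=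
  let tokens := ((PySem.Str.split? time_discretization "-").getD []).filter (fun t => t != "")
  let styles := tokens.filter (fun t => PySem.Str.slice t none (some 4) == "use_")
  let discretization_style := styles.getLast?.getD "use_Nyquist"
  let nonuniform_spacing := tokens.contains "random"
  let numbers := tokens.filter (fun t => !(PySem.Str.slice t none (some 4) == "use_") && t != "random")
  let N :=
    match numbers.mapM PySem.Int.ofStr? with
    | some ns => ns.getLast?.getD (2 * (omegas.length : Int) + 1)
    | none => 2 * (omegas.length : Int) + 1   -- unreachable under Pre_ (Python B raises ValueError here)
  (discretization_style, nonuniform_spacing, N)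

-- ===== PRECONDITION & SPEC =====
-- Pre_ excludes exactly the inputs where int() raises ValueError in both A and B: a non-empty token that is
-- neither a 'use_…' style nor 'random' but is not a valid Python int literal.
def Pre_parse_time_discretization_string (omegas : List Int) (time_discretization : String) : Prop :=
  ∀ t ∈ (PySem.Str.split? time_discretization "-").getD [],
    t ≠ "" → PySem.Str.slice t none (some 4) ≠ "use_" → t ≠ "random" → (PySem.Int.ofStr? t).isSome = true
instance (omegas : List Int) (time_discretization : String) : Decidable (Pre_parse_time_discretization_string omegas time_discretization) := by unfold Pre_parse_time_discretization_string; infer_instance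

def pvWitness_parse_time_discretization_string : List Int × String := ([1, 2], "use_T1-random-5")

def Spec_parse_time_discretization_string (omegas : List Int) (time_discretization : String) (out : String × Bool × Int) : Prop := out = parse_time_discretization_string_alt omegas time_discretization
instance (omegas : List Int) (time_discretization : String) (out : String × Bool × Int) : Decidable (Spec_parse_time_discretization_string omegas time_discretization out) := by unfold Spec_parse_time_discretization_string; infer_instance

-- ===== CLAIM (what is proved, stated in full; the proofs are below) =====
def Claim_equal_parse_time_discretization_string : Prop := ∀ (omegas : List Int) (time_discretization : String), Dom_parse_time_discretization_string omegas time_discretization → Pre_parse_time_discretization_string omegas time_discretization → Spec_parse_time_discretization_string omegas time_discretization (parse_time_discretization_string omegas time_discretization)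

-- ===== LEMMAS AND PROOFS =====

theorem getLast?_cons_getD {α : Type} (l : List α) : ∀ (a d : α),
    ((a :: l).getLast?.getD d) = l.getLast?.getD a := by
  induction l with
  | nil => intro a d; rfl
  | cons x xs ih => intro a d; rw [List.getLast?_cons_cons, ih x d, ih x a]

theorem mapM_eq_filterMap {α β : Type} (f : α → Option β) (l : List α)
    (h : ∀ x ∈ l, (f x).isSome = true) : l.mapM f = some (l.filterMap f) := by
  induction l with
  | nil => rfl
  | cons x xs ih =>
    have hx := h x (by simp)
    obtain ⟨v, hv⟩ := Option.isSome_iff_exists.mp hx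
    have := ih (fun y hy => h y (by simp [hy]))
    simp [List.mapM_cons, hv, this]

-- characterization of A's fold by B's three passes, with generalized defaults
theorem foldA_eq (ts : List String)
    (h : ∀ t ∈ ts, t ≠ "" → PySem.Str.slice t none (some 4) ≠ "use_" → t ≠ "random" → (PySem.Int.ofStr? t).isSome = true)
    (s : String) (b : Bool) (n : Int) :
    ts.foldl pvStepA (some (s, b, n)) =
      some ( ((ts.filter (fun t => t != "")).filter (fun t => PySem.Str.slice t none (some 4) == "use_")).getLast?.getD s,
             (b || (ts.filter (fun t => t != "")).contains "random"),
             (((ts.filter (fun t => t != "")).filter (fun t => !(PySem.Str.slice t none (some 4) == "use_") && t != "random")).filterMap PySem.Int.ofStr?).getLast?.getD n ) := by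
  induction ts generalizing s b n with
  | nil => simp
  | cons t ts ih =>
    have htail : ∀ x ∈ ts, x ≠ "" → PySem.Str.slice x none (some 4) ≠ "use_" → x ≠ "random" → (PySem.Int.ofStr? x).isSome = true :=
      fun x hx => h x (by simp [hx])
    by_cases he : t = ""
    · subst he
      simp [pvStepA, ih htail]
    · by_cases hu : PySem.Str.slice t none (some 4) = "use_"
      · have hr' : ("random" : String) ≠ t := by
          intro hh; rw [← hh] at hu; exact absurd hu (by decide)
        simp [pvStepA, he, hu, hr', ih htail, getLast?_cons_getD]
      · by_cases hr : t = "random"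
        · subst hr
          have hf : (PySem.Str.slice "random" none (some 4) == "use_") = false := by decide
          simp [pvStepA, ih htail, hf]
        · obtain ⟨v, hv⟩ := Option.isSome_iff_exists.mp (h t (by simp) he hu hr)
          have hr' : ("random" : String) ≠ t := fun hh => hr hh.symm
          simp [pvStepA, he, hu, hr, hr', hv, ih htail, getLast?_cons_getD]

-- ===== VERDICT (by name: the statement is the Claim_ definition above) =====
theorem parse_time_discretization_string_spec : Claim_equal_parse_time_discretization_string := by
  intro omegas td _ hpre
  unfold Spec_parse_time_discretization_string
  unfold parse_time_discretization_string parse_time_discretization_string_alt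
  have hpre' : ∀ t ∈ (PySem.Str.split? td "-").getD [], t ≠ "" → PySem.Str.slice t none (some 4) ≠ "use_" → t ≠ "random" → (PySem.Int.ofStr? t).isSome = true := hpre
  have h1 := foldA_eq ((PySem.Str.split? td "-").getD []) hpre'

  have hnum : ∀ x ∈ (((PySem.Str.split? td "-").getD []).filter (fun t => t != "")).filter
      (fun t => !(PySem.Str.slice t none (some 4) == "use_") && t != "random"), (PySem.Int.ofStr? x).isSome = true := by
    intro x hx
    simp only [List.mem_filter, bne_iff_ne, ne_eq, Bool.and_eq_true, Bool.not_eq_true', beq_eq_false_iff_ne] at hx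
    exact hpre' x hx.1.1 hx.1.2 hx.2.1 hx.2.2
  have h2 := mapM_eq_filterMap PySem.Int.ofStr? _ hnum
  simp only [h1, h2, Bool.false_or]
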